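-- pv_equiv track=rewrite | github.com/AnnnLeen/AnnnLeen.github.io | python/lab1/17.py | elements_between
-- ===== SOURCE A (Python) =====
-- def elements_between(arr):
--     min = arr[0]
--     for i in range(1, len(arr)):
--         if arr[i] < min:
--             min = arr[i]
--     first_min_index = arr.index(min)
--     last_min_index = len(arr) - 1 - arr[::-1].index(min)
--     if first_min_index != last_min_index:
--         k = abs(first_min_index - last_min_index) - 1
--         return k
--     else:
--         return 0
-- ===== SOURCE B (Python) =====
-- def elements_between(arr):
--     m, first, last = arr[0], 0, 0
--     for i, x in enumerate(arr):
--         if x < m: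
--             m, first, last = x, i, i
--         elif x == m:
--             last = i
--     return last - first - 1 if first != last else 0
-- ===== Notes on version B (the rewrite author's own statement) =====
-- stated objective: alternative
-- what changed: Single forward pass tracking (min, first index, last index) together replaces the min-loop plus two separate .index scans (one over a reversed copy).
import Mathlib
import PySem

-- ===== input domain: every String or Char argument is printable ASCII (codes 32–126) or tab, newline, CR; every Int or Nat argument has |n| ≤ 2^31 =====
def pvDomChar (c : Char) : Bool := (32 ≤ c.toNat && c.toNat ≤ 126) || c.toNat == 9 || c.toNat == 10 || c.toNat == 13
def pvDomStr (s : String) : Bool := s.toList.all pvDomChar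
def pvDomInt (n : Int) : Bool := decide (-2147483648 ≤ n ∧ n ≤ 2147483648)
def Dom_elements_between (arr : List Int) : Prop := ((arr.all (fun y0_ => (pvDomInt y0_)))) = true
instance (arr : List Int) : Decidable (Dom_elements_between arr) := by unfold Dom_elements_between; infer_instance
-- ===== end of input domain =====

-- B replaces A's min-loop plus two .index scans (one on a reversed copy) by one forward pass
-- tracking (min, first index, last index) together; same O(n) cost, different decomposition.


-- ===== PORT A =====
def elements_between (arr : List Int) : Int :=
  let m0 := PySem.List.pyGetD arr 0 0
  let m := (PySem.List.pyRange 1 (arr.length : Int) 1).foldl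
      (fun m i => if PySem.List.pyGetD arr i 0 < m then PySem.List.pyGetD arr i 0 else m) m0
  let first : Int := ((PySem.List.index? arr m).getD 0 : Nat)
  let rev := (PySem.List.slice? arr none none (-1)).getD []
  let last : Int := (arr.length : Int) - 1 - (((PySem.List.index? rev m).getD 0 : Nat) : Int)
  if first ≠ last then |first - last| - 1 else 0

-- ===== PORT B =====
def elements_between_alt (arr : List Int) : Int :=
  let s := (PySem.List.enumerate arr).foldl
      (fun (s : Int × Int × Int) (p : Int × Int) =>
        if p.2 < s.1 then (p.2, p.1, p.1)
        else if p.2 = s.1 then (s.1, s.2.1, p.1)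
        else s)
      (PySem.List.pyGetD arr 0 0, 0, 0)
  if s.2.1 ≠ s.2.2 then s.2.2 - s.2.1 - 1 else 0

-- ===== PRECONDITION & SPEC =====
-- Pre_ excludes only the empty list, on which Python A (and B) raise IndexError at the first-element access.
def Pre_elements_between (arr : List Int) : Prop := arr ≠ []
instance (arr : List Int) : Decidable (Pre_elements_between arr) := by unfold Pre_elements_between; infer_instance
def pvWitness_elements_between : List Int := [3, 1, 2, 1, 5]

def Spec_elements_between (arr : List Int) (out : Int) : Prop := out = elements_between_alt arr
instance (arr : List Int) (out : Int) : Decidable (Spec_elements_between arr out) := by unfold Spec_elements_between; infer_instance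

-- ===== CLAIM (what is proved, stated in full; the proofs are below) =====
def Claim_equal_elements_between : Prop := ∀ (arr : List Int), Dom_elements_between arr → Pre_elements_between arr → Spec_elements_between arr (elements_between arr)

-- ===== LEMMAS AND PROOFS =====

def pvMinf : Int → Int → Int := fun m x => if x < m then x else m

def pvStep : (Int × Int × Int) → (Int × Int) → (Int × Int × Int) :=
  fun s p =>
    if p.2 < s.1 then (p.2, p.1, p.1)
    else if p.2 = s.1 then (s.1, s.2.1, p.1)
    else s

def pvM (xs : List Int) : Int := xs.foldl pvMinf (xs.headD 0)
def pvF (xs : List Int) : Int := ((PySem.List.index? xs (pvM xs)).getD 0 : Nat)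
def pvL (xs : List Int) : Int :=
  (xs.length : Int) - 1 - (((PySem.List.index? xs.reverse (pvM xs)).getD 0 : Nat) : Int)

theorem pvMinf_def : pvMinf = fun m x => if x < m then x else m := rfl

theorem pvMinf_self (a : Int) : pvMinf a a = a := by
  simp [pvMinf]

theorem foldl_minf_le_init : ∀ (xs : List Int) (m : Int), xs.foldl pvMinf m ≤ m := by
  intro xs
  induction xs with
  | nil => intro m; simp
  | cons y ys ih =>
    intro m
    have h := ih (pvMinf m y)
    have : pvMinf m y ≤ m := by simp [pvMinf]; split <;> omega
    calc (y :: ys).foldl pvMinf m = ys.foldl pvMinf (pvMinf m y) := rfl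
      _ ≤ pvMinf m y := h
      _ ≤ m := this

theorem foldl_minf_le_mem : ∀ (xs : List Int) (m x : Int), x ∈ xs → xs.foldl pvMinf m ≤ x := by
  intro xs
  induction xs with
  | nil => intro m x hx; simp at hx
  | cons y ys ih =>
    intro m x hx
    rcases List.mem_cons.mp hx with h | h
    · subst h
      have h1 := foldl_minf_le_init ys (pvMinf m x)
      have : pvMinf m x ≤ x := by simp [pvMinf]; split <;> omega
      calc (x :: ys).foldl pvMinf m = ys.foldl pvMinf (pvMinf m x) := rfl
        _ ≤ pvMinf m x := h1
        _ ≤ x := this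
    · exact ih (pvMinf m y) x h

theorem foldl_minf_cases : ∀ (xs : List Int) (m : Int),
    xs.foldl pvMinf m = m ∨ xs.foldl pvMinf m ∈ xs := by
  intro xs
  induction xs with
  | nil => intro m; left; rfl
  | cons y ys ih =>
    intro m
    have h := ih (pvMinf m y)
    rcases h with h | h
    · by_cases hy : y < m
      · right
        have hthis : pvMinf m y = y := by simp [pvMinf, hy]
        rw [hthis] at h
        simp only [List.foldl_cons, hthis, h]
        exact List.mem_cons_self ..
      · left
        have hthis : pvMinf m y = m := by simp [pvMinf, hy]
        rw [hthis] at h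
        simp only [List.foldl_cons, hthis, h]
    · right
      exact List.mem_cons.mpr (Or.inr h)

theorem pvM_cons (a : Int) (t : List Int) : pvM (a :: t) = t.foldl pvMinf a := by
  simp [pvM, pvMinf_self]

theorem pvM_mem (xs : List Int) (h : xs ≠ []) : pvM xs ∈ xs := by
  cases xs with
  | nil => exact absurd rfl h
  | cons a t =>
    rw [pvM_cons]
    rcases foldl_minf_cases t a with h1 | h1
    · rw [h1]; exact List.mem_cons_self ..
    · exact List.mem_cons.mpr (Or.inr h1)

theorem pvM_le (xs : List Int) (x : Int) (hx : x ∈ xs) : pvM xs ≤ x := by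
  cases xs with
  | nil => simp at hx
  | cons a t =>
    rw [pvM_cons]
    rcases List.mem_cons.mp hx with h | h
    · subst h; exact foldl_minf_le_init t x
    · exact foldl_minf_le_mem t a x h

theorem pvM_append (pre : List Int) (y : Int) (h : pre ≠ []) :
    pvM (pre ++ [y]) = pvMinf (pvM pre) y := by
  unfold pvM
  rw [List.foldl_append]
  congr 1
  cases pre with
  | nil => exact absurd rfl h
  | cons a t => simp

-- the one-element step of B's fold preserves the (min, first, last) characterisation
theorem pvStep_correct (pre : List Int) (y : Int) (h : pre ≠ []) :
    pvStep (pvM pre, pvF pre, pvL pre) ((pre.length : Int), y)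
      = (pvM (pre ++ [y]), pvF (pre ++ [y]), pvL (pre ++ [y])) := by
  have hm := pvM_mem pre h
  have hMapp := pvM_append pre y h
  by_cases h1 : y < pvM pre
  · -- new strict minimum
    have hmin : pvM (pre ++ [y]) = y := by rw [hMapp]; simp [pvMinf, h1]
    have hnot : y ∉ pre := fun hy => absurd (pvM_le pre y hy) (by omega)
    have hf : PySem.List.index? (pre ++ [y]) y = some pre.length :=
      PySem.List.index?_append_singleton_self pre y hnot
    have hl : PySem.List.index? (pre ++ [y]).reverse y = some 0 := by
      rw [List.reverse_append]
      simp only [List.reverse_singleton, List.singleton_append]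
      exact PySem.List.index?_cons_self y pre.reverse
    simp only [pvStep, if_pos h1]
    refine Prod.ext hmin.symm (Prod.ext ?_ ?_)
    · simp only [pvF, hmin]
      rw [hf]
      simp
    · simp only [pvL, hmin]
      rw [hl]
      simp
  · by_cases h2 : y = pvM pre
    · -- equal to minimum: last moves
      have hmin : pvM (pre ++ [y]) = pvM pre := by rw [hMapp]; simp [pvMinf, h1]
      have hf : PySem.List.index? (pre ++ [y]) (pvM pre) = PySem.List.index? pre (pvM pre) :=
        PySem.List.index?_append_of_mem [y] hm
      have hl : PySem.List.index? (pre ++ [y]).reverse (pvM pre) = some 0 := by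
        rw [List.reverse_append]
        simp only [List.reverse_singleton, List.singleton_append]
        rw [h2]
        exact PySem.List.index?_cons_self (pvM pre) pre.reverse
      simp only [pvStep, if_neg h1, if_pos h2]
      refine Prod.ext hmin.symm (Prod.ext ?_ ?_)
      · simp only [pvF, hmin]
        rw [hf]
      · simp only [pvL, hmin]
        rw [hl]
        simp
    · -- larger: nothing changes
      have hmin : pvM (pre ++ [y]) = pvM pre := by rw [hMapp]; simp [pvMinf, h1]
      have hf : PySem.List.index? (pre ++ [y]) (pvM pre) = PySem.List.index? pre (pvM pre) :=
        PySem.List.index?_append_of_mem [y] hm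
      obtain ⟨r, hr⟩ := Option.isSome_iff_exists.mp
        ((PySem.List.index?_isSome_iff pre.reverse (pvM pre)).mpr (List.mem_reverse.mpr hm))
      have hl : PySem.List.index? (pre ++ [y]).reverse (pvM pre)
          = (PySem.List.index? pre.reverse (pvM pre)).map (· + 1) := by
        rw [List.reverse_append]
        simp only [List.reverse_singleton, List.singleton_append]
        exact PySem.List.index?_cons_of_ne pre.reverse h2
      simp only [pvStep, if_neg h1, if_neg h2]
      refine Prod.ext hmin.symm (Prod.ext ?_ ?_)
      · simp only [pvF, hmin]
        rw [hf]
      · simp only [pvL, hmin]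
        rw [hl, hr]
        simp only [Option.map_some, Option.getD_some, List.length_append,
          List.length_singleton]
        push_cast
        ring

theorem pvFold_correct : ∀ (xs pre : List Int), pre ≠ [] →
    (PySem.List.enumerate xs (pre.length : Int)).foldl pvStep (pvM pre, pvF pre, pvL pre)
      = (pvM (pre ++ xs), pvF (pre ++ xs), pvL (pre ++ xs)) := by
  intro xs
  induction xs with
  | nil => intro pre h; simp [PySem.List.enumerate_nil]
  | cons y ys ih =>
    intro pre h
    rw [PySem.List.enumerate_cons, List.foldl_cons, pvStep_correct pre y h]
    have hcast : (pre.length : Int) + 1 = (((pre ++ [y]).length : Nat) : Int) := by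
      simp
    rw [hcast, ih (pre ++ [y]) (by simp)]
    simp [List.append_assoc]

-- first occurrence index is at most last occurrence index
theorem pvF_le_pvL (xs : List Int) (h : xs ≠ []) : pvF xs ≤ pvL xs := by
  have hm := pvM_mem xs h
  obtain ⟨f, hf⟩ := Option.isSome_iff_exists.mp
    ((PySem.List.index?_isSome_iff xs (pvM xs)).mpr hm)
  obtain ⟨r, hr⟩ := Option.isSome_iff_exists.mp
    ((PySem.List.index?_isSome_iff xs.reverse (pvM xs)).mpr (List.mem_reverse.mpr hm))
  obtain ⟨hflt, hfeq, hfmin⟩ := PySem.List.getElem_of_index?_eq_some hf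
  obtain ⟨hrlt, hreq, -⟩ := PySem.List.getElem_of_index?_eq_some hr
  rw [List.length_reverse] at hrlt
  have hrev : xs.reverse[r]'(by simpa using hrlt) = xs[xs.length - 1 - r]'(by omega) := by
    rw [List.getElem_reverse]
  have hle : f ≤ xs.length - 1 - r := by
    by_contra hcon
    exact hfmin (xs.length - 1 - r) (by omega) (by rw [← hrev, hreq])
  simp only [pvF, pvL, hf, hr, Option.getD_some]
  omega

-- the A port computes (min, first, last) in pvM/pvF/pvL form
theorem elements_between_eq (arr : List Int) (h : arr ≠ []) :
    elements_between arr = if pvF arr ≠ pvL arr then |pvF arr - pvL arr| - 1 else 0 := by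
  cases arr with
  | nil => exact absurd rfl h
  | cons a t =>
    simp only [elements_between]
    have hfold := PySem.List.foldl_pyRange_pyGetD' (a :: t) 0
      (fun m x => if x < m then x else m) (PySem.List.pyGetD (a :: t) 0 0) (a := 1) (by omega)
    simp only [hfold, PySem.List.slice?_none_none_neg_one, Option.getD_some]
    have hm : ((a :: t).drop (1 : Int).toNat).foldl (fun m x => if x < m then x else m)
        (PySem.List.pyGetD (a :: t) 0 0) = pvM (a :: t) := by
      rw [pvM_cons]
      simp [PySem.List.pyGetD_zero, pvMinf_def]
    rw [hm]
    rfl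

-- the B port computes the same triple via the single-pass fold
theorem elements_between_alt_eq (arr : List Int) (h : arr ≠ []) :
    elements_between_alt arr = if pvF arr ≠ pvL arr then pvL arr - pvF arr - 1 else 0 := by
  cases arr with
  | nil => exact absurd rfl h
  | cons a t =>
    simp only [elements_between_alt]
    have hstep : (fun (s : Int × Int × Int) (p : Int × Int) =>
        if p.2 < s.1 then (p.2, p.1, p.1)
        else if p.2 = s.1 then (s.1, s.2.1, p.1)
        else s) = pvStep := rfl
    have hsingle : (pvM [a], pvF [a], pvL [a]) = (a, (0 : Int), (0 : Int)) := by
      simp [pvM, pvF, pvL, pvMinf_self]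
    have hinit : PySem.List.pyGetD (a :: t) 0 0 = a := by
      simp [PySem.List.pyGetD_zero]
    rw [hstep, hinit, PySem.List.enumerate_cons]
    have hstep0 : pvStep (a, 0, 0) (0, a) = (a, 0, 0) := by
      simp [pvStep]
    rw [List.foldl_cons, hstep0, ← hsingle]
    have hlen : (0 : Int) + 1 = (([a].length : Nat) : Int) := by simp
    rw [hlen, pvFold_correct t [a] (by simp)]
    simp

-- ===== VERDICT (by name: the statement is the Claim_ definition above) =====
theorem elements_between_spec : Claim_equal_elements_between := by
  intro arr _ hpre
  unfold Spec_elements_between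
  rw [elements_between_eq arr hpre, elements_between_alt_eq arr hpre]
  have hle := pvF_le_pvL arr hpre
  split_ifs with h
  · have : |pvF arr - pvL arr| = pvL arr - pvF arr := by
      rw [abs_sub_comm]
      exact abs_of_nonneg (by omega)
    omega
  · rfl
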